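-- pv_equiv track=rewrite | github.com/chchaeun/study-algorithm | 프로그래머스/Lv.2/220117_60058.py | solution
-- ===== SOURCE A (Python) =====
-- def solution(p):
--     # p가 없으면 빈 문자열 리턴
--     if not p:
--         return ""
--     # u, v 나누기
--     u, v = divide(p)
--
--     # u가 올바른 문자열이면 u는 그대로 리턴
--     if isCorrect(u):
--         return u+solution(v)
--     # 아니면 괄호 사이에 u를 뒤집어서 리턴
--     else:
--         answer = '('
--         answer+=solution(v)
--         answer+=')'
--         for i in u[1:-1]:
--             if i=='(':
--                 answer+=')'
--             else:
--                 answer+='('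
--         return answer
--
-- def divide(s):
--     left = right = 0
--     for i in range(len(s)):
--         if s[i]=='(':
--             left +=1
--         elif s[i]==')':
--             right+=1
--         if left==right:
--             return s[:i+1], s[i+1:]
--
-- def isCorrect(u):
--     stack = []
--     for i in u:
--         if i == '(':
--             stack.append(i)
--         else:
--             if not stack:
--                 return False
--             stack.pop()
--     return True
-- ===== SOURCE B (Python) =====
-- def solution(p):
--     # Iterative: split p into balanced-count segments left to right, collect prefix
--     # parts in order and deferred suffix parts on a stack, join once at the end.
--     pref = []
--     suf = []
--     s = p
--     while s:
--         bal = 0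
--         for j, c in enumerate(s):
--             if c == '(':
--                 bal += 1
--             elif c == ')':
--                 bal -= 1
--             if bal == 0:
--                 break
--         u, s = s[:j+1], s[j+1:]
--         if _correct(u):
--             pref.append(u)
--         else:
--             pref.append('(')
--             suf.append(')' + ''.join(')' if c == '(' else '(' for c in u[1:-1]))
--     return ''.join(pref) + ''.join(reversed(suf))
--
-- def _correct(u):
--     depth = 0
--     for c in u:
--         if c == '(':
--             depth += 1
--         elif depth == 0:
--             return False
--         else:
--             depth -= 1
--     return True
-- ===== Notes on version B (the rewrite author's own statement) =====
-- stated objective: faster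
-- what changed: Replaced A's recursion with per-level string re-concatenation ('('+solution(v)+')'+flip) by a single iterative loop that splits p into balanced-count segments with one balance counter, collects prefix pieces in order and deferred suffix pieces on a stack, and joins everything once at the end; correctness check uses a depth counter instead of a stack list.
import Mathlib
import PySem

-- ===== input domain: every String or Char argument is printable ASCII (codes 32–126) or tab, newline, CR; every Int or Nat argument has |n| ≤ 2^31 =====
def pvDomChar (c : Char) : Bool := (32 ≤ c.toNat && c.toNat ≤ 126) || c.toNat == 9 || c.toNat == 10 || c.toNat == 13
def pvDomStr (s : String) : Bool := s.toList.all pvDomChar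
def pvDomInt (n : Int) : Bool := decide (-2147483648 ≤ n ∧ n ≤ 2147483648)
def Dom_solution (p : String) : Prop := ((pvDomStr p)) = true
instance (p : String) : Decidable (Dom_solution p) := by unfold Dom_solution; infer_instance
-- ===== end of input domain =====

-- B replaces A's recursion with per-level string re-concatenation by one iterative
-- segment loop with a deferred-suffix stack and a single join (objective: faster).

-- ===== PORT A =====
-- divide's 'for i in range(len(s))' loop: structural recursion carrying left/right and i
def divideLoop : List Char → Int → Int → Nat → Option Nat
  | [], _, _, _ => none
  | c :: rest, left, right, i =>
      let left := if c = '(' then left + 1 else left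
      let right := if c ≠ '(' ∧ c = ')' then right + 1 else right
      if left = right then some (i + 1) else divideLoop rest left right (i + 1)

-- divide: returns (s[:i+1], s[i+1:]) at the first i with left == right, else None
def divideA (s : List Char) : Option (List Char × List Char) :=
  match divideLoop s 0 0 0 with
  | some j => some (s.take j, s.drop j)
  | none => none

def isCorrectAux : List Char → List Char → Bool
  | [], _ => true
  | c :: rest, stack =>
      if c = '(' then isCorrectAux rest (stack ++ ['('])
      else match stack with
           | [] => false
           | _ :: _ => isCorrectAux rest stack.dropLast

-- the 'for i in u[1:-1]: answer += …' loop, appending to the accumulator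
def flipLoopA : List Char → List Char → List Char
  | [], answer => answer
  | c :: rest, answer => flipLoopA rest (answer ++ [if c = '(' then ')' else '('])

theorem divideLoop_pos (s : List Char) : ∀ (l r : Int) (n j : Nat),
    divideLoop s l r n = some j → n < j := by
  induction s with
  | nil => intro l r n j h; simp [divideLoop] at h
  | cons c rest ih =>
      intro l r n j h
      simp only [divideLoop] at h
      by_cases hLR : (if c = '(' then l + 1 else l) = (if c ≠ '(' ∧ c = ')' then r + 1 else r)
      · rw [if_pos hLR] at h
        injection h with h
        omega
      · rw [if_neg hLR] at h
        have := ih _ _ _ _ h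
        omega

theorem divideA_length (s u v : List Char) (h : divideA s = some (u, v)) (hs : s ≠ []) :
    v.length < s.length := by
  unfold divideA at h
  cases e : divideLoop s 0 0 0 with
  | none => rw [e] at h; cases h
  | some j =>
      rw [e] at h
      have hj : 0 < j := divideLoop_pos s 0 0 0 j e
      have hv : v = s.drop j := by injection h with h'; exact (congrArg Prod.snd h').symm
      have hl : 0 < s.length := List.length_pos_iff.mpr hs
      subst hv; simp [List.length_drop]; omega

def solA (s : List Char) : List Char :=
  if hs : s = [] then []
  else
    match hd : divideA s with
    | none => []        -- Python A raises TypeError here (divide returned None); unreachable under Pre_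
    | some (u, v) =>
      if isCorrectAux u [] then u ++ solA v
      else
        let answer := ['(']
        let answer := answer ++ solA v
        let answer := answer ++ [')']
        -- u[1:-1] = (u.drop 1).dropLast, exact for every length
        flipLoopA ((u.drop 1).dropLast) answer
termination_by s.length
decreasing_by
  · exact divideA_length s u v hd hs
  · exact divideA_length s u v hd hs

def solution (p : String) : String :=
  String.mk (solA p.toList)

-- ===== PORT B =====
-- the 'for j, c in enumerate(s): … if bal == 0: break' loop, returning the split length j+1
def findSplit : List Char → Int → Nat → Nat
  | [], _, n => n        -- loop fell through: j = len(s)-1, split length = len(s) = n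
  | c :: rest, bal, n =>
      let bal := if c = '(' then bal + 1 else if c = ')' then bal - 1 else bal
      if bal = 0 then n + 1 else findSplit rest bal (n + 1)

theorem findSplit_pos (s : List Char) : ∀ (bal : Int) (n : Nat),
    s ≠ [] → n + 1 ≤ findSplit s bal n := by
  induction s with
  | nil => intro _ _ h; exact absurd rfl h
  | cons c rest ih =>
      intro bal n _
      simp only [findSplit]
      by_cases hz : (if c = '(' then bal + 1 else if c = ')' then bal - 1 else bal) = 0
      · rw [if_pos hz]
      · rw [if_neg hz]
        by_cases hr : rest = []
        · subst hr; simp [findSplit]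
        · have := ih (if c = '(' then bal + 1 else if c = ')' then bal - 1 else bal) (n + 1) hr
          omega

def correctB : List Char → Int → Bool
  | [], _ => true
  | c :: rest, depth =>
      if c = '(' then correctB rest (depth + 1)
      else if depth = 0 then false
      else correctB rest (depth - 1)

def flipB (c : Char) : Char := if c = '(' then ')' else '('

def solBGo (s : List Char) (pref suf : List (List Char)) :
    List (List Char) × List (List Char) :=
  if hs : s = [] then (pref, suf)
  else
    let n := findSplit s 0 0
    let u := s.take n
    let s' := s.drop n
    if correctB u 0 then solBGo s' (pref ++ [u]) suf
    else solBGo s' (pref ++ [['(']]) (suf ++ [')' :: ((u.drop 1).dropLast).map flipB])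
termination_by s.length
decreasing_by
  all_goals
    have h1 : 1 ≤ findSplit s 0 0 := findSplit_pos s 0 0 hs
    have hl : 0 < s.length := List.length_pos_iff.mpr hs
    simp [List.length_drop]; omega
  
def solution_alt (p : String) : String :=
  let r := solBGo p.toList [] []
  String.mk (r.1.flatten ++ r.2.reverse.flatten)

-- ===== PRECONDITION & SPEC =====
-- Pre_ excludes exactly the inputs with unequal '(' and ')' counts, on which A's divide
-- eventually returns None and A raises TypeError while unpacking it.
def Pre_solution (p : String) : Prop := p.toList.count '(' = p.toList.count ')'
instance (p : String) : Decidable (Pre_solution p) := by unfold Pre_solution; infer_instance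

def pvWitness_solution : String := ")()(()"

def Spec_solution (p : String) (out : String) : Prop := out = solution_alt p
instance (p : String) (out : String) : Decidable (Spec_solution p out) := by unfold Spec_solution; infer_instance

-- ===== CLAIM (what is proved, stated in full; the proofs are below) =====
def Claim_equal_solution : Prop := ∀ (p : String), Dom_solution p → Pre_solution p → Spec_solution p (solution p)

-- ===== LEMMAS AND PROOFS =====

-- signed paren balance of a list of chars
def balOf (l : List Char) : Int := (l.count '(' : Int) - (l.count ')' : Int)

theorem balOf_nil : balOf [] = 0 := by simp [balOf]

theorem balOf_cons (c : Char) (l : List Char) :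
    balOf (c :: l) = (if c = '(' then (1 : Int) else if c = ')' then -1 else 0) + balOf l := by
  simp only [balOf, List.count_cons]
  by_cases h1 : c = '(' <;> by_cases h2 : c = ')' <;>
    simp [h1, h2, beq_iff_eq] <;> omega

theorem balOf_append (a b : List Char) : balOf (a ++ b) = balOf a + balOf b := by
  simp [balOf, List.count_append]; omega

theorem balOf_nonempty_of_ne (l : List Char) (h : balOf l ≠ 0) : l ≠ [] := by
  intro hl; subst hl; exact h balOf_nil

-- the balance update of one char equals adding the char's signed delta
theorem delta_eq (c : Char) (bal : Int) :
    (if c = '(' then bal + 1 else if c = ')' then bal - 1 else bal)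
      = bal + (if c = '(' then (1 : Int) else if c = ')' then -1 else 0) := by
  by_cases h1 : c = '(' <;> by_cases h2 : c = ')' <;> simp [h1, h2] <;> omega

-- the start index only shifts findSplit's result
theorem findSplit_shift (s : List Char) : ∀ (bal : Int) (n : Nat),
    findSplit s bal n = findSplit s bal 0 + n := by
  induction s with
  | nil => intro bal n; simp [findSplit]
  | cons c rest ih =>
      intro bal n
      simp only [findSplit, delta_eq, Nat.zero_add]
      by_cases hz : bal + (if c = '(' then (1 : Int) else if c = ')' then -1 else 0) = 0
      · simp [hz]; omega
      · rw [if_neg hz, if_neg hz, ih _ (n + 1), ih _ 1]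
        omega

-- L1: on a tail with vanishing total balance, divide's loop breaks exactly at findSplit
theorem divideLoop_eq_findSplit (s : List Char) : ∀ (l r : Int) (n : Nat),
    s ≠ [] → (l - r) + balOf s = 0 →
    divideLoop s l r n = some (findSplit s (l - r) n) := by
  induction s with
  | nil => intro _ _ _ h; exact absurd rfl h
  | cons c rest ih =>
      intro l r n _ hbal
      rw [balOf_cons] at hbal
      simp only [divideLoop, findSplit, delta_eq]
      have hLR : (if c = '(' then l + 1 else l) - (if ¬c = '(' ∧ c = ')' then r + 1 else r)
          = (l - r) + (if c = '(' then (1 : Int) else if c = ')' then -1 else 0) := by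
        by_cases h1 : c = '(' <;> by_cases h2 : c = ')' <;> simp [h1, h2] <;> omega
      by_cases hz : (l - r) + (if c = '(' then (1 : Int) else if c = ')' then -1 else 0) = 0
      · have hLReq : (if c = '(' then l + 1 else l) = (if ¬c = '(' ∧ c = ')' then r + 1 else r) := by
          omega
        rw [if_pos hLReq, if_pos hz]
      · have hLRne : ¬ (if c = '(' then l + 1 else l) = (if ¬c = '(' ∧ c = ')' then r + 1 else r) := by
          omega
        rw [if_neg hLRne, if_neg hz]
        have hrest : rest ≠ [] := balOf_nonempty_of_ne rest (by omega)
        have hb' : ((if c = '(' then l + 1 else l) - (if ¬c = '(' ∧ c = ')' then r + 1 else r))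
            + balOf rest = 0 := by omega
        rw [ih _ _ (n + 1) hrest hb', hLR]

-- L2: the split prefix restores the balance to zero
theorem findSplit_take_bal (s : List Char) : ∀ (bal : Int),
    s ≠ [] → bal + balOf s = 0 →
    bal + balOf (s.take (findSplit s bal 0)) = 0 := by
  induction s with
  | nil => intro _ h; exact absurd rfl h
  | cons c rest ih =>
      intro bal _ hbal
      rw [balOf_cons] at hbal
      simp only [findSplit, delta_eq, Nat.zero_add]
      by_cases hz : bal + (if c = '(' then (1 : Int) else if c = ')' then -1 else 0) = 0
      · rw [if_pos hz, List.take_succ_cons, List.take_zero, balOf_cons, balOf_nil]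
        omega
      · rw [if_neg hz, findSplit_shift rest _ 1, List.take_succ_cons, balOf_cons]
        have hrest : rest ≠ [] := balOf_nonempty_of_ne rest (by omega)
        have := ih _ hrest (by omega :
          (bal + (if c = '(' then (1 : Int) else if c = ')' then -1 else 0)) + balOf rest = 0)
        omega

-- L3: isCorrect's stack only matters through its length
theorem isCorrect_eq_correctB (u : List Char) : ∀ (stack : List Char),
    isCorrectAux u stack = correctB u (stack.length : Int) := by
  induction u with
  | nil => intro _; rfl
  | cons c rest ih =>
      intro stack
      simp only [isCorrectAux, correctB]
      by_cases h1 : c = '('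
      · simp only [if_pos h1]
        rw [ih (stack ++ ['('])]
        congr 1
        simp
      · simp only [if_neg h1]
        cases stack with
        | nil => simp
        | cons a t =>
            have hlen : ¬ (((a :: t).length : Int) = 0) := by
              simp only [List.length_cons]
              push_cast
              omega
            rw [if_neg hlen, ih (a :: t).dropLast]
            show correctB rest (((a :: t).dropLast.length : Int))
              = correctB rest (((a :: t).length : Int) - 1)
            congr 1
            simp only [List.length_dropLast, List.length_cons]
            push_cast
            omega

-- flip loop = append of a map
theorem flipLoopA_eq (mid : List Char) : ∀ (answer : List Char),
    flipLoopA mid answer = answer ++ mid.map flipB := by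
  induction mid with
  | nil => intro a; simp [flipLoopA]
  | cons c rest ih =>
      intro a
      simp only [flipLoopA, List.map_cons]
      rw [ih]
      simp [flipB]

-- one-step unfolding of solA past the divide match
theorem solA_eq (s u v : List Char) (hnil : s ≠ []) (h : divideA s = some (u, v)) :
    solA s = if isCorrectAux u [] then u ++ solA v
             else flipLoopA ((u.drop 1).dropLast) ((['('] ++ solA v) ++ [')']) := by
  rw [solA, dif_neg hnil]
  split
  · rename_i heq
    rw [h] at heq; cases heq
  · rename_i u' v' heq
    rw [h] at heq
    injection heq with heq
    rw [Prod.mk.injEq] at heq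
    obtain ⟨h1, h2⟩ := heq
    subst h1; subst h2
    rfl

-- one-step unfolding of solBGo
theorem solBGo_eq (s : List Char) (pref suf : List (List Char)) (hnil : s ≠ []) :
    solBGo s pref suf =
      if correctB (s.take (findSplit s 0 0)) 0
      then solBGo (s.drop (findSplit s 0 0)) (pref ++ [s.take (findSplit s 0 0)]) suf
      else solBGo (s.drop (findSplit s 0 0)) (pref ++ [['(']])
             (suf ++ [')' :: (((s.take (findSplit s 0 0)).drop 1).dropLast).map flipB]) := by
  rw [solBGo, dif_neg hnil]

-- L4: solBGo's accumulators are prefixes of the result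
theorem solBGo_acc_aux (N : Nat) : ∀ (s : List Char), s.length ≤ N → ∀ (pref suf : List (List Char)),
    solBGo s pref suf = (pref ++ (solBGo s [] []).1, suf ++ (solBGo s [] []).2) := by
  induction N with
  | zero =>
      intro s hs pref suf
      cases s with
      | nil => simp [solBGo]
      | cons c t => simp at hs
  | succ N ih =>
      intro s hs pref suf
      by_cases hnil : s = []
      · subst hnil; simp [solBGo]
      · have h1 : 1 ≤ findSplit s 0 0 := findSplit_pos s 0 0 hnil
        have hl : 0 < s.length := List.length_pos_iff.mpr hnil
        have hdrop : (s.drop (findSplit s 0 0)).length ≤ N := by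
          simp [List.length_drop]; omega
        rw [solBGo_eq s pref suf hnil, solBGo_eq s [] [] hnil]
        by_cases hc : correctB (s.take (findSplit s 0 0)) 0
        · rw [if_pos hc, if_pos hc,
              ih _ hdrop (pref ++ [s.take (findSplit s 0 0)]) suf,
              ih _ hdrop ([] ++ [s.take (findSplit s 0 0)]) []]
          simp
        · rw [if_neg hc, if_neg hc,
              ih _ hdrop (pref ++ [['(']]) _,
              ih _ hdrop ([] ++ [['(']]) _]
          simp

-- Main lemma: on balanced-count lists the two algorithms agree
theorem main_aux (N : Nat) : ∀ (s : List Char), s.length ≤ N → balOf s = 0 →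
    solA s = (solBGo s [] []).1.flatten ++ (solBGo s [] []).2.reverse.flatten := by
  induction N with
  | zero =>
      intro s hs _
      cases s with
      | nil => simp [solA, solBGo]
      | cons c t => simp at hs
  | succ N ih =>
      intro s hs hbal
      by_cases hnil : s = []
      · subst hnil; simp [solA, solBGo]
      · have hdiv : divideA s = some (s.take (findSplit s 0 0), s.drop (findSplit s 0 0)) := by
          unfold divideA
          rw [show divideLoop s 0 0 0 = some (findSplit s (0 - 0) 0) from
                divideLoop_eq_findSplit s 0 0 0 hnil (by omega)]
          norm_num
        have h1 : 1 ≤ findSplit s 0 0 := findSplit_pos s 0 0 hnil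
        have hl : 0 < s.length := List.length_pos_iff.mpr hnil
        have hub : balOf (s.take (findSplit s 0 0)) = 0 := by
          have := findSplit_take_bal s 0 hnil (by omega)
          omega
        have hvb : balOf (s.drop (findSplit s 0 0)) = 0 := by
          have h := balOf_append (s.take (findSplit s 0 0)) (s.drop (findSplit s 0 0))
          rw [List.take_append_drop] at h
          omega
        have hvlen : (s.drop (findSplit s 0 0)).length ≤ N := by
          simp [List.length_drop]; omega
        have ihv := ih _ hvlen hvb
        rw [solA_eq s _ _ hnil hdiv, solBGo_eq s [] [] hnil,
            isCorrect_eq_correctB _ []]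
        simp only [List.length_nil, Nat.cast_zero]
        by_cases hc : correctB (s.take (findSplit s 0 0)) 0
        · rw [if_pos hc, if_pos hc,
              solBGo_acc_aux N _ hvlen ([] ++ [s.take (findSplit s 0 0)]) [], ihv]
          simp
        · rw [if_neg hc, if_neg hc, flipLoopA_eq,
              solBGo_acc_aux N _ hvlen ([] ++ [['(']]) _, ihv]
          simp

-- ===== VERDICT (by name: the statement is the Claim_ definition above) =====
theorem solution_spec : Claim_equal_solution := by
  intro p _ hpre
  unfold Spec_solution solution solution_alt
  have hb : balOf p.toList = 0 := by
    unfold Pre_solution at hpre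
    unfold balOf
    omega
  rw [main_aux p.toList.length p.toList le_rfl hb]
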